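-- pv_equiv track=rewrite | github.com/StarkAI3/PMCBOTv1 | chatbot/terminal_chatbot_openai.py | format_pinecone_results
-- ===== SOURCE A (Python) =====
-- def format_pinecone_results(docs):
--     formatted = []
--     for i, doc in enumerate(docs, 1):
--         meta = doc.get('metadata', {})
--         title = meta.get('title', '')
--         description = meta.get('description', '')
--         date = meta.get('date', meta.get('display_date', ''))
--         department = meta.get('department', '')
--         ward_name = meta.get('ward_name', '')
--         record_type = meta.get('record_type', '')
--
--         # Prefer PDF, then external, then url
--         link = meta.get('pdf_url') or meta.get('external_link') or meta.get('url')
--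
--         s = f"Record {i}:\n"
--         if title:
--             s += f"Title: {title}\n"
--         if description:
--             s += f"Description: {description}\n"
--         if date:
--             s += f"Date: {date}\n"
--         if department:
--             s += f"Department: {department}\n"
--         if ward_name:
--             s += f"Ward: {ward_name}\n"
--         if record_type and record_type != 'other':
--             s += f"Type: {record_type}\n"
--         if link:
--             s += f"Link: {link}\n"
--         formatted.append(s.strip())
--     return '\n---\n'.join(formatted)
-- ===== SOURCE B (Python) =====
-- # Table-driven renderer: a generic field spec resolved by a single lookup rule,
-- # lines collected into a list (last line right-stripped), one global join.
--
-- _SPEC = [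
--     ('Title', ('title',), False, None),
--     ('Description', ('description',), False, None),
--     ('Date', ('date', 'display_date'), False, None),
--     ('Department', ('department',), False, None),
--     ('Ward', ('ward_name',), False, None),
--     ('Type', ('record_type',), False, 'other'),
--     ('Link', ('pdf_url', 'external_link', 'url'), True, None),
-- ]
--
--
-- def _value(meta, keys, truthy):
--     if truthy:
--         # first truthy value among the keys
--         for k in keys:
--             v = meta.get(k)
--             if v:
--                 return v
--         return ''
--     # first key present in the dict wins, even with an empty value
--     for k in keys:
--         if k in meta:
--             return meta[k]
--     return ''
--
--
-- def _lines(i, meta):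
--     out = ['Record %d:' % i]
--     for label, keys, truthy, omit in _SPEC:
--         v = _value(meta, keys, truthy)
--         if v and v != omit:
--             out.append('%s: %s' % (label, v))
--     out[-1] = out[-1].rstrip()
--     return out
--
--
-- def format_pinecone_results(docs):
--     blocks = ['\n'.join(_lines(i, doc.get('metadata', {})))
--               for i, doc in enumerate(docs, 1)]
--     return '\n---\n'.join(blocks)
-- ===== Notes on version B (the rewrite author's own statement) =====
-- stated objective: alternative
-- what changed: B replaces A's hand-written chain of seven conditional string concatenations plus a final strip by a table-driven renderer: a field-spec table (label, keys, lookup mode, omitted value) resolved by one generic first-present/first-truthy lookup routine, lines collected into a list whose last element is right-stripped, and a single global join over all records.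
import Mathlib
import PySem

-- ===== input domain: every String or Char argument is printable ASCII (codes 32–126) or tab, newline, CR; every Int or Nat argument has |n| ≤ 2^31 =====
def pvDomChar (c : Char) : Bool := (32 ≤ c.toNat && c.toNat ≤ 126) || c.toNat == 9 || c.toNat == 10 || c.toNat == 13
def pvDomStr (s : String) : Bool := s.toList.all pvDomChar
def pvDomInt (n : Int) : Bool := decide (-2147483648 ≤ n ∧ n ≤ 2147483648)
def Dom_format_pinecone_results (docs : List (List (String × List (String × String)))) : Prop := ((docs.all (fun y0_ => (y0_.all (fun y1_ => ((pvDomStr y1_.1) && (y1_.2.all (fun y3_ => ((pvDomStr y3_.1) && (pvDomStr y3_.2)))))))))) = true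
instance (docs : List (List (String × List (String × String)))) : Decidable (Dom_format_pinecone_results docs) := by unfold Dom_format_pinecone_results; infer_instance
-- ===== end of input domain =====

-- B replaces A's hand-written chain of conditional string concatenations by a table-driven renderer:
-- a field-spec table with a generic first-present/first-truthy resolver, lines collected in a list
-- (last line right-stripped), one global join; objective: alternative, same asymptotic cost.

-- ===== PORT A =====
-- Python 'a or b' on Option String operands (None/'' falsy)
def pvAOr (a b : Option String) : Option String :=
  match a with
  | some s => if s ≠ "" then some s else b
  | none => b

def format_pinecone_results (docs : List (List (String × List (String × String)))) : String :=
  let formatted := (PySem.List.enumerate docs 1).foldl (fun formatted idoc =>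
    let i := idoc.1
    let doc := idoc.2
    let m := (PySem.Dict.mk doc).getD "metadata" []
    let title := (PySem.Dict.mk m).getD "title" ""
    let description := (PySem.Dict.mk m).getD "description" ""
    let date := (PySem.Dict.mk m).getD "date" ((PySem.Dict.mk m).getD "display_date" "")
    let department := (PySem.Dict.mk m).getD "department" ""
    let ward_name := (PySem.Dict.mk m).getD "ward_name" ""
    let record_type := (PySem.Dict.mk m).getD "record_type" ""
    let link := pvAOr ((PySem.Dict.mk m).get? "pdf_url")
                  (pvAOr ((PySem.Dict.mk m).get? "external_link") ((PySem.Dict.mk m).get? "url"))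
    let s := "Record " ++ PySem.Int.toStr i ++ ":" ++ "\n"
    let s := if title ≠ "" then s ++ ("Title: " ++ title ++ "\n") else s
    let s := if description ≠ "" then s ++ ("Description: " ++ description ++ "\n") else s
    let s := if date ≠ "" then s ++ ("Date: " ++ date ++ "\n") else s
    let s := if department ≠ "" then s ++ ("Department: " ++ department ++ "\n") else s
    let s := if ward_name ≠ "" then s ++ ("Ward: " ++ ward_name ++ "\n") else s
    let s := if record_type ≠ "" ∧ record_type ≠ "other" then s ++ ("Type: " ++ record_type ++ "\n") else s
    let s := match link with
      | some l => if l ≠ "" then s ++ ("Link: " ++ l ++ "\n") else s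
      | none => s
    formatted ++ [PySem.Str.strip s]) []
  PySem.Str.join "\n---\n" formatted

-- ===== PORT B =====
-- Source B's _SPEC table: (label, keys, truthy, omit)
def pvSpec : List (String × List String × Bool × Option String) :=
  [("Title", ["title"], false, none),
   ("Description", ["description"], false, none),
   ("Date", ["date", "display_date"], false, none),
   ("Department", ["department"], false, none),
   ("Ward", ["ward_name"], false, none),
   ("Type", ["record_type"], false, some "other"),
   ("Link", ["pdf_url", "external_link", "url"], true, none)]

-- the truthy branch of Source B's _value: first truthy value among the keys
def pvFirstTruthyKey (m : PySem.Dict String String) : List String → String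
  | [] => ""
  | k :: rest =>
    match m.get? k with
    | some v => if v ≠ "" then v else pvFirstTruthyKey m rest
    | none => pvFirstTruthyKey m rest

-- the presence branch of Source B's _value: first key present in the dict wins
def pvFirstPresentKey (m : PySem.Dict String String) : List String → String
  | [] => ""
  | k :: rest =>
    match m.get? k with
    | some v => v
    | none => pvFirstPresentKey m rest

-- Source B's _value
def pvValue (m : PySem.Dict String String) (keys : List String) (truthy : Bool) : String :=
  if truthy then pvFirstTruthyKey m keys else pvFirstPresentKey m keys

-- Source B's 'out[-1] = out[-1].rstrip()' (the list is never empty)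
def pvUpdLast : List String → List String
  | [] => []
  | [x] => [PySem.Str.rstrip x]
  | x :: y :: xs => x :: pvUpdLast (y :: xs)

-- Source B's _lines
def pvLines (i : Int) (mta : List (String × String)) : List String :=
  let out := pvSpec.foldl (fun out f =>
    let v := pvValue (PySem.Dict.mk mta) f.2.1 f.2.2.1
    if (v != "") && (match f.2.2.2 with | some o => v != o | none => true) then
      out ++ [f.1 ++ ": " ++ v]
    else out) ["Record " ++ PySem.Int.toStr i ++ ":"]
  pvUpdLast out

def format_pinecone_results_alt (docs : List (List (String × List (String × String)))) : String :=
  PySem.Str.join "\n---\n" ((PySem.List.enumerate docs 1).map (fun idoc =>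
    PySem.Str.join "\n" (pvLines idoc.1 ((PySem.Dict.mk idoc.2).getD "metadata" []))))

-- ===== PRECONDITION & SPEC =====
def Spec_format_pinecone_results (docs : List (List (String × List (String × String)))) (out : String) : Prop := out = format_pinecone_results_alt docs
instance (docs : List (List (String × List (String × String)))) (out : String) : Decidable (Spec_format_pinecone_results docs out) := by unfold Spec_format_pinecone_results; infer_instance

-- ===== CLAIM (what is proved, stated in full; the proofs are below) =====
def Claim_equal_format_pinecone_results : Prop := ∀ (docs : List (List (String × List (String × String)))), Dom_format_pinecone_results docs → Spec_format_pinecone_results docs (format_pinecone_results docs)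

-- ===== LEMMAS AND PROOFS =====

-- A's per-record computation, named so the foldl-to-map lemma can be applied (defeq to A's loop body)
def pvRecA (idoc : Int × List (String × List (String × String))) : String :=
  let i := idoc.1
  let doc := idoc.2
  let m := (PySem.Dict.mk doc).getD "metadata" []
  let title := (PySem.Dict.mk m).getD "title" ""
  let description := (PySem.Dict.mk m).getD "description" ""
  let date := (PySem.Dict.mk m).getD "date" ((PySem.Dict.mk m).getD "display_date" "")
  let department := (PySem.Dict.mk m).getD "department" ""
  let ward_name := (PySem.Dict.mk m).getD "ward_name" ""
  let record_type := (PySem.Dict.mk m).getD "record_type" ""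
  let link := pvAOr ((PySem.Dict.mk m).get? "pdf_url")
                (pvAOr ((PySem.Dict.mk m).get? "external_link") ((PySem.Dict.mk m).get? "url"))
  let s := "Record " ++ PySem.Int.toStr i ++ ":" ++ "\n"
  let s := if title ≠ "" then s ++ ("Title: " ++ title ++ "\n") else s
  let s := if description ≠ "" then s ++ ("Description: " ++ description ++ "\n") else s
  let s := if date ≠ "" then s ++ ("Date: " ++ date ++ "\n") else s
  let s := if department ≠ "" then s ++ ("Department: " ++ department ++ "\n") else s
  let s := if ward_name ≠ "" then s ++ ("Ward: " ++ ward_name ++ "\n") else s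
  let s := if record_type ≠ "" ∧ record_type ≠ "other" then s ++ ("Type: " ++ record_type ++ "\n") else s
  let s := match link with
    | some l => if l ≠ "" then s ++ ("Link: " ++ l ++ "\n") else s
    | none => s
  PySem.Str.strip s

-- the (label, value) pairs A's seven guards effectively render, with Type normalised and the link resolved
def pvPairsOf (m : List (String × String)) : List (String × String) :=
  [("Title", (PySem.Dict.mk m).getD "title" ""),
   ("Description", (PySem.Dict.mk m).getD "description" ""),
   ("Date", (PySem.Dict.mk m).getD "date" ((PySem.Dict.mk m).getD "display_date" "")),
   ("Department", (PySem.Dict.mk m).getD "department" ""),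
   ("Ward", (PySem.Dict.mk m).getD "ward_name" ""),
   ("Type", (if (PySem.Dict.mk m).getD "record_type" "" = "other" then ""
             else (PySem.Dict.mk m).getD "record_type" "")),
   ("Link", pvFirstTruthyKey (PySem.Dict.mk m) ["pdf_url", "external_link", "url"])]

-- the field lines A appends, right-folded
def pvCat (pairs : List (String × String)) : List Char :=
  pairs.foldr (fun p r => if p.2 ≠ "" then (p.1 ++ ": " ++ p.2).toList ++ '\n' :: r else r) []

theorem pvFoldl_toList (pairs : List (String × String)) (s0 : String) :
    (pairs.foldl (fun s p => if p.2 ≠ "" then s ++ (p.1 ++ ": " ++ p.2 ++ "\n") else s) s0).toList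
      = s0.toList ++ pvCat pairs := by
  induction pairs generalizing s0 with
  | nil => simp [pvCat]
  | cons p rest ih =>
    simp only [List.foldl_cons, pvCat, List.foldr_cons]
    by_cases h : p.2 ≠ ""
    · simp only [if_pos h, ih, String.toList_append]
      simp [pvCat]
    · simp only [if_neg h, ih]
      simp [pvCat]

theorem pvCatJoin (pairs : List (String × String)) (h : List Char) :
    h ++ '\n' :: pvCat pairs
      = PySem.Chars.join ['\n']
          (h :: ((pairs.filter (fun p => p.2 ≠ "")).map (fun p => p.1 ++ ": " ++ p.2)).map String.toList)
        ++ ['\n'] := by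
  induction pairs generalizing h with
  | nil => simp [pvCat, PySem.Chars.join_singleton]
  | cons p rest ih =>
    by_cases hp : p.2 ≠ ""
    · rw [List.filter_cons_of_pos (by simp [hp])]
      simp only [List.map_cons, pvCat, List.foldr_cons, if_pos hp, PySem.Chars.join_cons_cons]
      have key := ih ((p.1 ++ ": " ++ p.2).toList)
      simp only [pvCat] at key
      rw [key]
      simp [List.append_assoc]
    · rw [List.filter_cons_of_neg (by simp [hp])]
      simp only [pvCat, List.foldr_cons, if_neg hp]
      exact ih h

theorem pvRstrip_newline (x : List Char) :
    PySem.Chars.rstrip (x ++ ['\n']) = PySem.Chars.rstrip x := by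
  simp [PySem.Chars.rstrip, PySem.Chars.isspace]

theorem pvStrip_cons_nonspace (c : Char) (t : List Char) (hc : PySem.Chars.isspace c = false) :
    PySem.Chars.strip (c :: t) = PySem.Chars.rstrip (c :: t) := by
  simp [PySem.Chars.strip, PySem.Chars.lstrip, List.dropWhile, hc]

theorem pvJoin_head (c : Char) (rest : List Char) (L : List (List Char)) :
    ∃ t, PySem.Chars.join ['\n'] ((c :: rest) :: L) = c :: t := by
  cases L with
  | nil => exact ⟨rest, by rw [PySem.Chars.join_singleton]⟩
  | cons y ys =>
    refine ⟨rest ++ '\n' :: PySem.Chars.join ['\n'] (y :: ys), ?_⟩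
    rw [PySem.Chars.join_cons_cons]
    simp

-- rstrip does not empty a list containing a non-space character
theorem pvRstrip_ne_nil (l : List Char) (c : Char) (hc : c ∈ l)
    (hsp : PySem.Chars.isspace c = false) : PySem.Chars.rstrip l ≠ [] := by
  intro h
  have h2 : List.dropWhile PySem.Chars.isspace l.reverse = [] := by
    have := congrArg List.reverse h
    simpa [PySem.Chars.rstrip] using this
  have := (List.dropWhile_eq_nil_iff).mp h2 c (by simpa using hc)
  simp [hsp] at this

-- rstrip eats only into the right block when that block does not vanish
theorem pvRstrip_append (a b : List Char) (hb : PySem.Chars.rstrip b ≠ []) :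
    PySem.Chars.rstrip (a ++ b) = a ++ PySem.Chars.rstrip b := by
  have hne : (List.dropWhile PySem.Chars.isspace b.reverse).isEmpty = false := by
    rcases h : (List.dropWhile PySem.Chars.isspace b.reverse).isEmpty with _ | _
    · rfl
    · exfalso
      apply hb
      simp [PySem.Chars.rstrip, List.isEmpty_iff.mp h]
  simp [PySem.Chars.rstrip, List.reverse_append, List.dropWhile_append, hne]

-- chars-level 'replace the last block by its rstrip'
def pvCharsUpdLast : List (List Char) → List (List Char)
  | [] => []
  | [x] => [PySem.Chars.rstrip x]
  | x :: y :: xs => x :: pvCharsUpdLast (y :: xs)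

theorem pvUpdLast_toList (l : List String) :
    (pvUpdLast l).map String.toList = pvCharsUpdLast (l.map String.toList) := by
  induction l with
  | nil => rfl
  | cons x xs ih =>
    cases xs with
    | nil => simp [pvUpdLast, pvCharsUpdLast, PySem.Str.toList_rstrip]
    | cons y ys =>
      simp only [pvUpdLast, pvCharsUpdLast, List.map_cons] at *
      exact congrArg _ ih

theorem pvJoin_ne_nil (y : List Char) (ys : List (List Char)) (hy : ys = [] → y ≠ []) :
    PySem.Chars.join ['\n'] (y :: ys) ≠ [] := by
  cases ys with
  | nil =>
    rw [PySem.Chars.join_singleton]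
    exact hy rfl
  | cons z zs =>
    rw [PySem.Chars.join_cons_cons]
    simp

theorem pvCharsUpdLast_ne_nil (y : List Char) (ys : List (List Char)) :
    pvCharsUpdLast (y :: ys) ≠ [] := by
  cases ys <;> simp [pvCharsUpdLast]

-- rstrip of a '\n'-join rstrips just the last block (all blocks rstrip-nonempty)
theorem pvRstrip_join (y : List Char) (ys : List (List Char))
    (h : ∀ l ∈ y :: ys, PySem.Chars.rstrip l ≠ []) :
    PySem.Chars.rstrip (PySem.Chars.join ['\n'] (y :: ys))
      = PySem.Chars.join ['\n'] (pvCharsUpdLast (y :: ys)) := by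
  induction ys generalizing y with
  | nil =>
    rw [PySem.Chars.join_singleton, pvCharsUpdLast, PySem.Chars.join_singleton]
  | cons z zs ih =>
    have hz : ∀ l ∈ z :: zs, PySem.Chars.rstrip l ≠ [] := fun l hl => h l (by simp [hl])
    have hJ : PySem.Chars.rstrip (PySem.Chars.join ['\n'] (z :: zs)) ≠ [] := by
      rw [ih z hz]
      cases zs with
      | nil =>
        rw [show pvCharsUpdLast [z] = [PySem.Chars.rstrip z] from rfl]
        exact pvJoin_ne_nil _ _ (fun _ => hz z (by simp))
      | cons w ws =>
        rw [show pvCharsUpdLast (z :: w :: ws) = z :: pvCharsUpdLast (w :: ws) from rfl]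
        exact pvJoin_ne_nil _ _ (fun h0 => absurd h0 (pvCharsUpdLast_ne_nil w ws))
    rw [PySem.Chars.join_cons_cons,
      show y ++ ['\n'] ++ PySem.Chars.join ['\n'] (z :: zs)
        = y ++ ('\n' :: PySem.Chars.join ['\n'] (z :: zs)) by simp,
      pvRstrip_append y _ (by
        rw [show ('\n' :: PySem.Chars.join ['\n'] (z :: zs))
            = ['\n'] ++ PySem.Chars.join ['\n'] (z :: zs) from rfl,
          pvRstrip_append ['\n'] _ hJ]
        simp),
      show ('\n' :: PySem.Chars.join ['\n'] (z :: zs))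
          = ['\n'] ++ PySem.Chars.join ['\n'] (z :: zs) from rfl,
      pvRstrip_append ['\n'] _ hJ, ih z hz]
    cases hlast : pvCharsUpdLast (z :: zs) with
    | nil => exact absurd hlast (pvCharsUpdLast_ne_nil z zs)
    | cons u us =>
      rw [show pvCharsUpdLast (y :: z :: zs) = y :: pvCharsUpdLast (z :: zs) from rfl, hlast,
        PySem.Chars.join_cons_cons]
      simp

-- strip of a '\n'-join whose head starts with a non-space char = join with the last line rstripped
theorem pvStripJoinEq (hdr : String) (L : List String) (c : Char) (rest : List Char)
    (hh : hdr.toList = c :: rest) (hc : PySem.Chars.isspace c = false)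
    (hcolon : ∀ l ∈ hdr :: L, PySem.Chars.rstrip l.toList ≠ []) :
    PySem.Str.strip (PySem.Str.join "\n" (hdr :: L))
      = PySem.Str.join "\n" (pvUpdLast (hdr :: L)) := by
  rw [← String.toList_inj, PySem.Str.toList_strip, PySem.Str.toList_join, PySem.Str.toList_join,
    pvUpdLast_toList]
  have hnl : ("\n" : String).toList = ['\n'] := rfl
  rw [hnl, List.map_cons]
  have hmemr : ∀ l ∈ hdr.toList :: L.map String.toList, PySem.Chars.rstrip l ≠ [] := by
    intro l hl
    rcases List.mem_cons.mp hl with rfl | hl2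
    · exact hcolon hdr (by simp)
    · obtain ⟨s, hs, rfl⟩ := List.mem_map.mp hl2
      exact hcolon s (by simp [hs])
  have hstrip : PySem.Chars.strip (PySem.Chars.join ['\n'] (hdr.toList :: L.map String.toList))
      = PySem.Chars.rstrip (PySem.Chars.join ['\n'] (hdr.toList :: L.map String.toList)) := by
    rw [hh]
    obtain ⟨t, ht⟩ := pvJoin_head c rest (L.map String.toList)
    rw [ht]
    exact pvStrip_cons_nonspace c t hc
  rw [hstrip, pvRstrip_join _ _ hmemr]

-- per-record equality over an arbitrary pair list and a header starting with a non-space char: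
-- A's strip-of-concatenation = '\n'-join of the kept lines with the last one rstripped
theorem pvRecEq (hdr : String) (pairs : List (String × String)) (c : Char) (rest : List Char)
    (hh : hdr.toList = c :: rest) (hc : PySem.Chars.isspace c = false)
    (hcolon : ∀ l ∈ hdr :: (pairs.filter (fun p => p.2 ≠ "")).map (fun p => p.1 ++ ": " ++ p.2),
      PySem.Chars.rstrip l.toList ≠ []) :
    PySem.Str.strip
        (pairs.foldl (fun s p => if p.2 ≠ "" then s ++ (p.1 ++ ": " ++ p.2 ++ "\n") else s) (hdr ++ "\n"))
      = PySem.Str.join "\n"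
          (pvUpdLast (hdr :: (pairs.filter (fun p => p.2 ≠ "")).map (fun p => p.1 ++ ": " ++ p.2))) := by
  rw [← pvStripJoinEq hdr _ c rest hh hc hcolon, ← String.toList_inj,
    PySem.Str.toList_strip, PySem.Str.toList_strip,
    pvFoldl_toList, PySem.Str.toList_join, String.toList_append]
  have hnl : ("\n" : String).toList = ['\n'] := rfl
  rw [hnl, List.map_cons, hh]
  have hcat := pvCatJoin pairs (c :: rest)
  rw [show (c :: rest) ++ ['\n'] ++ pvCat pairs = (c :: rest) ++ '\n' :: pvCat pairs by simp, hcat]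
  obtain ⟨t, ht⟩ := pvJoin_head c rest
    (((pairs.filter (fun p => p.2 ≠ "")).map (fun p => p.1 ++ ": " ++ p.2)).map String.toList)
  rw [ht, show (c :: t) ++ ['\n'] = c :: (t ++ ['\n']) by simp,
    pvStrip_cons_nonspace c (t ++ ['\n']) hc, pvStrip_cons_nonspace c t hc,
    show c :: (t ++ ['\n']) = (c :: t) ++ ['\n'] by simp, pvRstrip_newline]

theorem pvTypeStep (rt : String) (s : String) :
    (if rt ≠ "" ∧ rt ≠ "other" then s ++ ("Type: " ++ rt ++ "\n") else s)
      = (if (if rt = "other" then "" else rt) ≠ "" then s ++ ("Type: " ++ (if rt = "other" then "" else rt) ++ "\n") else s) := by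
  by_cases h : rt = "other" <;> simp [h]

theorem pvLinkStep (m : PySem.Dict String String) (s : String) :
    (match pvAOr (m.get? "pdf_url") (pvAOr (m.get? "external_link") (m.get? "url")) with
      | some l => if l ≠ "" then s ++ ("Link: " ++ l ++ "\n") else s
      | none => s)
      = (if pvFirstTruthyKey m ["pdf_url", "external_link", "url"] ≠ ""
         then s ++ ("Link: " ++ pvFirstTruthyKey m ["pdf_url", "external_link", "url"] ++ "\n") else s) := by
  rcases h1 : m.get? "pdf_url" with _ | sa <;> rcases h2 : m.get? "external_link" with _ | sb <;>
    rcases h3 : m.get? "url" with _ | sc <;>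
    simp only [pvAOr, pvFirstTruthyKey, h1, h2, h3] <;> split_ifs <;> simp_all

-- the header string starts with 'R'
theorem pvHdrHead (i : Int) :
    ∃ rest, ("Record " ++ PySem.Int.toStr i ++ ":").toList = 'R' :: rest := by
  refine ⟨("ecord " : String).toList ++ (PySem.Int.toStr i).toList ++ (":" : String).toList, ?_⟩
  rw [String.toList_append, String.toList_append,
    show ("Record " : String).toList = 'R' :: ("ecord " : String).toList from rfl]
  simp

-- single-key presence lookup is getD
theorem pvPresentOne (m : PySem.Dict String String) (k : String) :
    pvFirstPresentKey m [k] = m.getD k "" := by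
  rw [PySem.Dict.getD_eq_get?_getD]
  rcases h : m.get? k with _ | v <;> simp [pvFirstPresentKey, h]

-- the Date fallback: first present key among date/display_date
theorem pvPresentDate (m : PySem.Dict String String) :
    pvFirstPresentKey m ["date", "display_date"] = m.getD "date" (m.getD "display_date" "") := by
  rcases h : m.get? "date" with _ | v
  · have hd : m.getD "date" (m.getD "display_date" "") = m.getD "display_date" "" := by
      rw [PySem.Dict.getD_eq_get?_getD, h]
      rfl
    rw [hd, ← pvPresentOne]
    simp [pvFirstPresentKey, h]
  · rw [PySem.Dict.getD_eq_get?_getD, h]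
    simp [pvFirstPresentKey, h]

-- B's spec-driven line fold = header :: the kept rendered pairs of pvPairsOf
theorem pvFoldSpec (i : Int) (mta : List (String × String)) :
    (pvSpec.foldl (fun out f =>
        let v := pvValue (PySem.Dict.mk mta) f.2.1 f.2.2.1
        if (v != "") && (match f.2.2.2 with | some o => v != o | none => true) then
          out ++ [f.1 ++ ": " ++ v]
        else out) ["Record " ++ PySem.Int.toStr i ++ ":"])
      = ("Record " ++ PySem.Int.toStr i ++ ":")
        :: ((pvPairsOf mta).filter (fun p => p.2 ≠ "")).map (fun p => p.1 ++ ": " ++ p.2) := by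
  rw [show ((pvPairsOf mta).filter (fun p => p.2 ≠ "")).map (fun p => p.1 ++ ": " ++ p.2)
      = ((pvPairsOf mta).filter (fun p => p.2 != "")).map (fun p => p.1 ++ ": " ++ p.2) by
    congr 1; apply List.filter_congr; intro p _; by_cases hp : p.2 = "" <;> simp [hp]]
  rw [show ("Record " ++ PySem.Int.toStr i ++ ":")
        :: ((pvPairsOf mta).filter (fun p => p.2 != "")).map (fun p => p.1 ++ ": " ++ p.2)
      = ["Record " ++ PySem.Int.toStr i ++ ":"]
        ++ ((pvPairsOf mta).filter (fun p => p.2 != "")).map (fun p => p.1 ++ ": " ++ p.2) from rfl,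
    ← PySem.List.foldl_append_if (fun p => p.2 != "") (fun p => p.1 ++ ": " ++ p.2) (pvPairsOf mta)]
  simp only [pvSpec, pvPairsOf, List.foldl_cons, List.foldl_nil, pvValue, pvPresentOne,
    pvPresentDate, Bool.and_true]
  by_cases h : (PySem.Dict.mk mta).getD "record_type" "" = "other" <;> simp [h]

-- A's per-record value = B's per-record value
theorem pvRecPoint (idoc : Int × List (String × List (String × String))) :
    pvRecA idoc
      = PySem.Str.join "\n" (pvLines idoc.1 ((PySem.Dict.mk idoc.2).getD "metadata" [])) := by
  obtain ⟨rest, hh⟩ := pvHdrHead idoc.1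
  have hcolon : ∀ l ∈ ("Record " ++ PySem.Int.toStr idoc.1 ++ ":")
      :: ((pvPairsOf ((PySem.Dict.mk idoc.2).getD "metadata" [])).filter (fun p => p.2 ≠ "")).map
        (fun p => p.1 ++ ": " ++ p.2),
      PySem.Chars.rstrip l.toList ≠ [] := by
    intro l hl
    rcases List.mem_cons.mp hl with rfl | hl2
    · refine pvRstrip_ne_nil _ ':' ?_ (by decide)
      rw [String.toList_append]
      exact List.mem_append_right _ (by decide)
    · obtain ⟨p, _, rfl⟩ := List.mem_map.mp hl2
      refine pvRstrip_ne_nil _ ':' ?_ (by decide)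
      rw [String.toList_append, String.toList_append]
      exact List.mem_append_left _ (List.mem_append_right _ (by decide))
  have key := pvRecEq ("Record " ++ PySem.Int.toStr idoc.1 ++ ":")
    (pvPairsOf ((PySem.Dict.mk idoc.2).getD "metadata" [])) 'R' rest hh (by decide) hcolon
  simp only [pvRecA, pvLines, pvFoldSpec]
  rw [pvLinkStep, pvTypeStep]
  simp only [pvPairsOf, List.foldl_cons, List.foldl_nil] at key
  simpa [show ("Title" : String) ++ ": " = "Title: " from rfl,
    show ("Description" : String) ++ ": " = "Description: " from rfl,
    show ("Date" : String) ++ ": " = "Date: " from rfl,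
    show ("Department" : String) ++ ": " = "Department: " from rfl,
    show ("Ward" : String) ++ ": " = "Ward: " from rfl,
    show ("Type" : String) ++ ": " = "Type: " from rfl,
    show ("Link" : String) ++ ": " = "Link: " from rfl] using key

-- ===== VERDICT (by name: the statement is the Claim_ definition above) =====
theorem format_pinecone_results_spec : Claim_equal_format_pinecone_results := by
  intro docs _
  show format_pinecone_results docs = format_pinecone_results_alt docs
  have hA : format_pinecone_results docs
      = PySem.Str.join "\n---\n" ([] ++ (PySem.List.enumerate docs 1).map pvRecA) :=
    congrArg (PySem.Str.join "\n---\n")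
      (PySem.List.foldl_append_singleton_eq_map pvRecA (PySem.List.enumerate docs 1) [])
  rw [hA, List.nil_append]
  unfold format_pinecone_results_alt
  exact congrArg _ (List.map_congr_left (fun a _ => pvRecPoint a))
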